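-- pv_equiv track=rewrite | github.com/alexandrepoulin/ProjectEulerInPython | usefulFunctions/useful.py | baseConvert10NumNum
-- ===== SOURCE A (Python) =====
-- def baseConvert10NumNum(x,n):
--     num = x
--     answer = 0
--     counter = -1
--     while num !=0:
--         counter+=1
--         temp = (num%n)
--         answer+=10**counter * temp
--         num= int((num-temp)/n)
--     return answer
-- ===== SOURCE B (Python) =====
-- def baseConvert10NumNum(x, n):
--     # Stage 1: collect the base-n digits (least significant first).
--     digits = []
--     while x != 0:
--         digits.append(x % n)
--         x //= n
--     # Stage 2: Horner-pack the digits into a decimal number, most significant first.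
--     answer = 0
--     for d in reversed(digits):
--         answer = answer * 10 + d
--     return answer
-- ===== Notes on version B (the rewrite author's own statement) =====
-- stated objective: alternative
-- what changed: Replaces A's single loop that maintains a counter and a 10**counter accumulator by a two-stage decomposition: first extract the list of base-n digits with floor division, then Horner-fold the reversed list into a decimal number (answer = answer*10 + d), with no powers or counter.
-- outside the precondition, e.g. on baseConvert10NumNum(0, 1): A returns 0, B returns 0
import Mathlib
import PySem

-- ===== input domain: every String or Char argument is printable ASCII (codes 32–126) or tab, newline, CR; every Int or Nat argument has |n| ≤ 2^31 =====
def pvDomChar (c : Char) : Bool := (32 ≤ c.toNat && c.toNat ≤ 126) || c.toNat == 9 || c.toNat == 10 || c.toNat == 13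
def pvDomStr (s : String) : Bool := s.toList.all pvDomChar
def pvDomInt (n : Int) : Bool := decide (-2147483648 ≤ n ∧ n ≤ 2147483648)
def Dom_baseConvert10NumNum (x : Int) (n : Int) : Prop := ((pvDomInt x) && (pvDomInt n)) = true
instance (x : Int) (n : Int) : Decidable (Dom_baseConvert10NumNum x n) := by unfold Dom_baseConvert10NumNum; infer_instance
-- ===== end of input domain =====

-- B replaces A's counter/power-of-10 accumulator loop by two stages: extract the
-- base-n digit list, then Horner-fold its reverse; objective: alternative.

-- ===== PORT A =====
-- A's while-loop, step for step; fuel makes it total in Lean (on every input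
-- admitted by Pre_ the fuel exceeds the number of loop iterations, so the
-- fuel-exhausted branch is never taken there).  `counter` starts at -1 and is
-- incremented before every use, so `(counter+1).toNat` after `counter += 1` is
-- exact.  `int((num-temp)/n)` is an exact division (n divides num-temp), so
-- Lean's Int division computes the same value.
def baseConvert10NumNumLoop (n : Int) (fuel : Nat) (num answer counter : Int) : Int :=
  match fuel with
  | 0 => answer
  | f + 1 =>
    if num = 0 then answer
    else
      let counter' := counter + 1
      let temp := PySem.Int.mod num n
      let answer' := answer + 10 ^ counter'.toNat * temp
      baseConvert10NumNumLoop n f ((num - temp) / n) answer' counter'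

def baseConvert10NumNum (x : Int) (n : Int) : Int :=
  baseConvert10NumNumLoop n (x.natAbs + 64) x 0 (-1)

-- ===== PORT B =====
-- B's stage 1: the digit list, least significant first (same fuel device).
def pvDigitsB (n : Int) (fuel : Nat) (x : Int) : List Int :=
  match fuel with
  | 0 => []
  | f + 1 =>
    if x = 0 then []
    else PySem.Int.mod x n :: pvDigitsB n f (PySem.Int.floordiv x n)

-- B's stage 2: Horner fold of the reversed digit list.
def baseConvert10NumNum_alt (x : Int) (n : Int) : Int :=
  (pvDigitsB n (x.natAbs + 64) x).reverse.foldl (fun answer d => answer * 10 + d) 0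

-- ===== PRECONDITION & SPEC =====
-- Pre_ is exactly the inputs where A's loop terminates (a well-known fact of
-- negative-base representations for n ≤ -2): for n ≥ 2 it terminates iff x ≥ 0
-- (for x < 0 `num` gets stuck at -1), for n ≤ -2 it terminates for every x, for
-- |n| ≤ 1 it hangs (n = ±1) or raises ZeroDivisionError (n = 0) whenever x ≠ 0.
-- The measure-zero corner x = 0 with |n| ≤ 1, where A returns 0 (the loop body
-- never runs) and B also returns 0, is excluded for the sake of a simple Pre_.
def Pre_baseConvert10NumNum (x : Int) (n : Int) : Prop :=
  (2 ≤ n ∧ 0 ≤ x) ∨ n ≤ -2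
instance (x : Int) (n : Int) : Decidable (Pre_baseConvert10NumNum x n) := by
  unfold Pre_baseConvert10NumNum; infer_instance

def pvWitness_baseConvert10NumNum : Int × Int := (19, 7)

def Spec_baseConvert10NumNum (x : Int) (n : Int) (out : Int) : Prop := out = baseConvert10NumNum_alt x n
instance (x : Int) (n : Int) (out : Int) : Decidable (Spec_baseConvert10NumNum x n out) := by unfold Spec_baseConvert10NumNum; infer_instance

-- ===== CLAIM (what is proved, stated in full; the proofs are below) =====
def Claim_equal_baseConvert10NumNum : Prop := ∀ (x : Int) (n : Int), Dom_baseConvert10NumNum x n → Pre_baseConvert10NumNum x n → Spec_baseConvert10NumNum x n (baseConvert10NumNum x n)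

-- ===== LEMMAS AND PROOFS =====

-- Value of a least-significant-first digit list in base 10.
def pvVal : List Int → Int
  | [] => 0
  | d :: ds => d + 10 * pvVal ds

-- The Horner fold of the reversed list computes acc * 10^len + pvVal.
theorem pvHorner_reverse (l : List Int) : ∀ acc : Int,
    l.reverse.foldl (fun answer d => answer * 10 + d) acc
      = acc * 10 ^ l.length + pvVal l := by
  induction l with
  | nil => intro acc; simp [pvVal]
  | cons d ds ih =>
    intro acc
    simp only [List.reverse_cons, List.foldl_append, List.foldl_cons, List.foldl_nil,
      ih, pvVal, List.length_cons, pow_succ]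
    ring

-- A's loop with accumulator (answer, counter) computes
-- answer + 10^(counter+1) * pvVal (B's digit list), for the SAME fuel,
-- provided counter+1 ≥ 0 and n ≠ 0.
theorem baseConvert10NumNumLoop_eq (n : Int) (hn : n ≠ 0) :
    ∀ (fuel : Nat) (num answer counter : Int), 0 ≤ counter + 1 →
      baseConvert10NumNumLoop n fuel num answer counter
        = answer + 10 ^ (counter + 1).toNat * pvVal (pvDigitsB n fuel num) := by
  intro fuel
  induction fuel with
  | zero => intro num answer counter _; simp [baseConvert10NumNumLoop, pvDigitsB, pvVal]
  | succ f ih =>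
    intro num answer counter hc
    by_cases h0 : num = 0
    · simp [baseConvert10NumNumLoop, pvDigitsB, pvVal, h0]
    · have hdiv : (num - PySem.Int.mod num n) / n = PySem.Int.floordiv num n := by
        have h := PySem.Int.floordiv_mul_add_mod num n
        have : num - PySem.Int.mod num n = PySem.Int.floordiv num n * n := by omega
        rw [this, Int.mul_ediv_cancel _ hn]
      have hrec := ih (PySem.Int.floordiv num n)
        (answer + 10 ^ (counter + 1).toNat * PySem.Int.mod num n) (counter + 1) (by omega)
      have hpow : (counter + 1 + 1).toNat = (counter + 1).toNat + 1 := by omega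
      simp only [baseConvert10NumNumLoop, pvDigitsB, pvVal, h0, if_false, hdiv]
      rw [hrec, hpow, pow_succ]
      ring

-- ===== VERDICT (by name: the statement is the Claim_ definition above) =====
theorem baseConvert10NumNum_spec : Claim_equal_baseConvert10NumNum := by
  intro x n _ hpre
  have hn : n ≠ 0 := by rcases hpre with ⟨h, _⟩ | h <;> omega
  unfold Spec_baseConvert10NumNum baseConvert10NumNum baseConvert10NumNum_alt
  rw [baseConvert10NumNumLoop_eq n hn (x.natAbs + 64) x 0 (-1) (by omega),
    pvHorner_reverse]
  norm_num
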